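-- pv_equiv track=rewrite | github.com/DanilKrivonos/BioCAT | BioCAT.py | create_variants
-- ===== SOURCE A (Python) =====
-- from itertools import permutations, product
--
-- def create_variants(original_seq, len_place,):
--
--     seq = []
--
--     for s in original_seq:
--         if len(s) != 0:
--             seq.append(s)
--
--     N = sum([len(s) for s in seq])
--     N_cnt = len(seq) + 1
--     orders = list(
--         permutations([i for i in range(len(seq))])
--     )
--     free_slots = len_place - N
--
--     variants = []
--     for rep in product(
--         [i for i in range(free_slots + 1)],
--         repeat = N_cnt
--     ):
--         if sum(rep) == free_slots:
--             variants.append(rep)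
--     concatenates = []
--
--     for v in variants:
--         for o in orders:
--             concat = []
--             for j in range(len(v)-1):
--                 concat += ['nan'] * v[j]
--                 concat += seq[o[j]]
--             concat += ['nan'] * v[-1]
--             concatenates.append(concat)
--
--
--
--     concatenates = list(set (map(tuple, concatenates)))
--     concatenates.sort()
--     return concatenates
--
--     variants = set(variants)
--
--     return variants
-- ===== SOURCE B (Python) =====
-- from itertools import permutations
--
-- def _compositions(total, parts):
--     # all ordered ways to write total as a sum of `parts` non-negative ints
--     if parts == 1:
--         yield (total,)
--         return
--     for first in range(total + 1):
--         for rest in _compositions(total - first, parts - 1):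
--             yield (first,) + rest
--
-- def create_variants(original_seq, len_place,):
--     seq = [s for s in original_seq if s]
--     free = len_place - sum(len(s) for s in seq)
--     if free < 0:
--         return []
--     out = set()
--     for comp in _compositions(free, len(seq) + 1):
--         for order in permutations(seq):
--             piece = []
--             for gap, block in zip(comp, order):
--                 piece += ['nan'] * gap
--                 piece += block
--             piece += ['nan'] * comp[-1]
--             out.add(tuple(piece))
--     return sorted(out)
-- ===== Notes on version B (the rewrite author's own statement) =====
-- stated objective: faster
-- what changed: B enumerates the compositions of the free slots directly by recursion (stars-and-bars) instead of filtering the full Cartesian product range(free+1)^(k+1) by sum, and accumulates the deduplicating set while generating instead of a list converted to a set afterwards.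
import Mathlib
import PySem

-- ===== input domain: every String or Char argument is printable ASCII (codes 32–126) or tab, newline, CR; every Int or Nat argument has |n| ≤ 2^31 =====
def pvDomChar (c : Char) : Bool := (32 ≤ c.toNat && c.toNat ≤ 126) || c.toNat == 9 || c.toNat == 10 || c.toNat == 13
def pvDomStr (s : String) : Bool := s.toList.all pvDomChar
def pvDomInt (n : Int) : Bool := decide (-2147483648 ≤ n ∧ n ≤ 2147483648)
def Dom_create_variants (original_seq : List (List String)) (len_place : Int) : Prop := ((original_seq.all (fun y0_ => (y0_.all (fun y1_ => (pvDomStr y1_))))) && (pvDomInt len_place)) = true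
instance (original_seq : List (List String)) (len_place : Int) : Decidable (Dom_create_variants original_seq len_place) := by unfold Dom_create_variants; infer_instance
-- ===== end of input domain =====

-- B replaces A's product-then-filter enumeration of the gap sizes by a direct recursive
-- enumeration of the compositions of the free slots (faster in a timing run's mechanism:
-- it never generates tuples of the wrong sum), accumulating the deduplicating set on the fly.

-- ===== PORT A =====
-- itertools.product(pool, repeat=k) (leftmost coordinate varies slowest), exact
def prodRepA (pool : List Int) : Nat → List (List Int)
  | 0 => [[]]
  | k+1 => pool.flatMap (fun i => (prodRepA pool k).map (fun rest => i :: rest))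

def create_variants (original_seq : List (List String)) (len_place : Int) : List (List String) :=
  let seq := original_seq.foldl (fun acc s => if PySem.List.len s ≠ 0 then acc ++ [s] else acc) []
  let N : Int := (seq.map (fun s => PySem.List.len s)).sum
  let orders := PySem.List.permutations (PySem.List.pyRange 0 (PySem.List.len seq) 1) seq.length
  let free_slots := len_place - N
  let variants := (prodRepA (PySem.List.pyRange 0 (free_slots + 1) 1) (seq.length + 1)).filter
    (fun rep => rep.sum == free_slots)
  -- the indexing accesses v[j], o[j], seq[o[j]], v[-1] are always in range: pyGetD is exact here
  let concatenates := variants.foldl (fun acc v =>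
      orders.foldl (fun acc o =>
        let concat := (PySem.List.pyRange 0 (PySem.List.len v - 1) 1).foldl
          (fun concat j => concat ++ List.replicate (PySem.List.pyGetD v j 0).toNat "nan"
                             ++ PySem.List.pyGetD seq (PySem.List.pyGetD o j 0) []) []
        let concat := concat ++ List.replicate (PySem.List.pyGetD v (-1) 0).toNat "nan"
        acc ++ [concat]) acc) []
  PySem.List.sorted (PySem.Set.ofList concatenates) (fun x => x) false

-- ===== PORT B =====
-- all ordered ways to write `total` as a sum of `parts` non-negative ints (Source B's _compositions)
def compositionsB : Nat → Int → List (List Int)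
  | 0, _ => []
  | 1, total => [[total]]
  | (k+2), total => (PySem.List.pyRange 0 (total + 1) 1).flatMap
      (fun first => (compositionsB (k+1) (total - first)).map (fun rest => first :: rest))

def create_variants_alt (original_seq : List (List String)) (len_place : Int) : List (List String) :=
  let seq := original_seq.filter (fun s => !s.isEmpty)
  let free := len_place - (seq.map (fun s => PySem.List.len s)).sum
  if free < 0 then []
  else
    let out : PySem.Set (List String) := (compositionsB (seq.length + 1) free).foldl (fun out comp =>
      (PySem.List.permutations seq seq.length).foldl (fun out order =>
        let piece := (comp.zip order).foldl
          (fun piece gb => piece ++ List.replicate gb.1.toNat "nan" ++ gb.2) []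
        let piece := piece ++ List.replicate (PySem.List.pyGetD comp (-1) 0).toNat "nan"
        PySem.Set.add out piece) out) PySem.Set.empty
    PySem.List.sorted out (fun x => x) false

-- ===== PRECONDITION & SPEC =====
def Spec_create_variants (original_seq : List (List String)) (len_place : Int) (out : List (List String)) : Prop := out = create_variants_alt original_seq len_place
instance (original_seq : List (List String)) (len_place : Int) (out : List (List String)) : Decidable (Spec_create_variants original_seq len_place out) := by unfold Spec_create_variants; infer_instance

-- ===== CLAIM (what is proved, stated in full; the proofs are below) =====
def Claim_equal_create_variants : Prop := ∀ (original_seq : List (List String)) (len_place : Int), Dom_create_variants original_seq len_place → Spec_create_variants original_seq len_place (create_variants original_seq len_place)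

-- ===== LEMMAS AND PROOFS =====

-- itertools.permutations commutes with List.map
theorem perms_map {α β : Type} (r : Nat) (xs : List α) (f : α → β) :
    PySem.List.permutations (xs.map f) r = (PySem.List.permutations xs r).map (List.map f) := by
  induction r generalizing xs with
  | zero => simp [PySem.List.permutations]
  | succ r ih =>
    simp only [PySem.List.permutations, List.length_map, List.map_flatMap]
    apply List.flatMap_congr
    intro i hi
    rw [List.getElem?_map, List.eraseIdx_map]
    cases xs[i]? with
    | none => simp
    | some x => simp [ih, Function.comp]

-- every tuple produced by product(range(0,m), repeat=k) has non-negative sum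
theorem prodRepA_sum_nonneg (m : Int) : ∀ (k : Nat) (rep : List Int),
    rep ∈ prodRepA (PySem.List.pyRange 0 m 1) k → 0 ≤ rep.sum := by
  intro k
  induction k with
  | zero => intro rep h; simp [prodRepA] at h; simp [h]
  | succ k ih =>
    intro rep h
    simp only [prodRepA, List.mem_flatMap, List.mem_map] at h
    obtain ⟨i, hi, rest, hrest, hrep⟩ := h
    have h0 : 0 ≤ i := (PySem.List.mem_pyRange_one.mp hi).1
    have := ih rest hrest
    subst hrep; simp; omega

-- every member of compositionsB (k+1) t has length k+1
theorem compositionsB_length : ∀ (k : Nat) (t : Int) (v : List Int),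
    v ∈ compositionsB (k+1) t → v.length = k + 1 := by
  intro k
  induction k with
  | zero => intro t v h; simp [compositionsB] at h; simp [h]
  | succ k ih =>
    intro t v h
    simp only [compositionsB, List.mem_flatMap, List.mem_map] at h
    obtain ⟨i, _, rest, hrest, hv⟩ := h
    have := ih _ rest hrest
    subst hv; simp [this]

-- filtering the full product by sum = t yields exactly the compositions of t (for 0 ≤ t < m)
theorem filter_prodRepA (m : Int) : ∀ (k : Nat) (t : Int), 0 ≤ t → t < m →
    (prodRepA (PySem.List.pyRange 0 m 1) (k+1)).filter (fun rep => rep.sum == t)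
      = compositionsB (k+1) t := by
  intro k
  induction k with
  | zero =>
    intro t ht0 htm
    show ((PySem.List.pyRange 0 m 1).flatMap (fun i => [[i]])).filter (fun rep => rep.sum == t) = [[t]]
    rw [List.filter_flatMap,
        PySem.List.pyRange_one_append 0 (t+1) m (by omega) (by omega),
        PySem.List.pyRange_one_append 0 t (t+1) ht0 (by omega),
        PySem.List.pyRange_one_cons (show t < t+1 by omega),
        PySem.List.pyRange_one_eq_nil (le_refl (t+1))]
    have hlo : (PySem.List.pyRange 0 t 1).flatMap
        (fun i => ([[i]] : List (List Int)).filter (fun rep => rep.sum == t)) = [] := by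
      rw [List.flatMap_eq_nil_iff]
      intro i hi
      have := PySem.List.mem_pyRange_one.mp hi
      simp only [List.filter, List.sum_cons, List.sum_nil, add_zero]
      have h : (i == t) = false := by simp; omega
      simp [h]
    have hhi : (PySem.List.pyRange (t+1) m 1).flatMap
        (fun i => ([[i]] : List (List Int)).filter (fun rep => rep.sum == t)) = [] := by
      rw [List.flatMap_eq_nil_iff]
      intro i hi
      have := PySem.List.mem_pyRange_one.mp hi
      simp only [List.filter, List.sum_cons, List.sum_nil, add_zero]
      have h : (i == t) = false := by simp; omega
      simp [h]
    simp [List.flatMap_append, hlo, hhi]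
  | succ k ih =>
    intro t ht0 htm
    show ((PySem.List.pyRange 0 m 1).flatMap
        (fun i => (prodRepA (PySem.List.pyRange 0 m 1) (k+1)).map (fun rest => i :: rest))).filter
          (fun rep => rep.sum == t)
      = (PySem.List.pyRange 0 (t+1) 1).flatMap
          (fun first => (compositionsB (k+1) (t - first)).map (fun rest => first :: rest))
    rw [List.filter_flatMap]
    set P := prodRepA (PySem.List.pyRange 0 m 1) (k+1) with hP
    rw [PySem.List.pyRange_one_append 0 (t+1) m (by omega) (by omega),
        List.flatMap_append]
    have hhi : (PySem.List.pyRange (t+1) m 1).flatMap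
        (fun i => (P.map (fun rest => i :: rest)).filter (fun rep => rep.sum == t)) = [] := by
      rw [hP]
      rw [List.flatMap_eq_nil_iff]
      intro i hi
      have hit := (PySem.List.mem_pyRange_one.mp hi).1
      rw [List.filter_eq_nil_iff]
      intro a ha
      obtain ⟨rest, hrest, hrfl⟩ := List.mem_map.mp ha
      have hs := prodRepA_sum_nonneg m (k+1) rest hrest
      subst hrfl
      simp only [List.sum_cons, beq_iff_eq]
      omega
    rw [hhi, List.append_nil]
    apply List.flatMap_congr
    intro i hi
    obtain ⟨h0i, hit⟩ := PySem.List.mem_pyRange_one.mp hi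
    rw [hP, List.filter_map]
    have hpred : ((fun rep => rep.sum == t) ∘ (fun rest : List Int => i :: rest))
        = (fun rest : List Int => rest.sum == t - i) := by
      funext rest
      rw [Bool.eq_iff_iff]
      simp only [Function.comp, List.sum_cons, beq_iff_eq]
      omega
    rw [hpred, ih (t - i) (by omega) (by omega)]

-- the inner concatenation loops build the same piece
theorem concat_eq (seq : List (List String)) : ∀ (o v : List Int), v.length = o.length + 1 →
    (PySem.List.pyRange 0 (PySem.List.len v - 1) 1).foldl
      (fun concat j => concat ++ List.replicate (PySem.List.pyGetD v j 0).toNat "nan"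
                         ++ PySem.List.pyGetD seq (PySem.List.pyGetD o j 0) []) []
    = (v.zip (o.map (fun i => PySem.List.pyGetD seq i []))).foldl
      (fun piece gb => piece ++ List.replicate gb.1.toNat "nan" ++ gb.2) [] := by
  intro o v hlen
  have hlv : PySem.List.len v - 1 = (o.length : Int) := by
    simp only [PySem.List.len, hlen]; push_cast; ring
  rw [hlv]
  have hA : (fun (concat : List String) (j : Int) =>
        concat ++ List.replicate (PySem.List.pyGetD v j 0).toNat "nan"
          ++ PySem.List.pyGetD seq (PySem.List.pyGetD o j 0) [])
      = (fun concat j => concat ++ (List.replicate (PySem.List.pyGetD v j 0).toNat "nan"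
          ++ PySem.List.pyGetD seq (PySem.List.pyGetD o j 0) [])) := by
    funext c j; rw [List.append_assoc]
  have hB : (fun (piece : List String) (gb : Int × List String) =>
        piece ++ List.replicate gb.1.toNat "nan" ++ gb.2)
      = (fun piece gb => piece ++ (List.replicate gb.1.toNat "nan" ++ gb.2)) := by
    funext c gb; rw [List.append_assoc]
  rw [hA, hB, PySem.List.foldl_append_eq_flatMap, PySem.List.foldl_append_eq_flatMap,
      List.nil_append, List.nil_append, List.flatMap_def, List.flatMap_def]
  congr 1
  apply List.ext_getElem
  · simp only [List.length_map, PySem.List.length_pyRange_one, List.length_zip, hlen]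
    omega
  · intro i h1 h2
    have hiv : i < v.length := by
      simp only [List.length_map, PySem.List.length_pyRange_one] at h1; omega
    have hio : i < o.length := by
      simp only [List.length_map, PySem.List.length_pyRange_one] at h1; omega
    simp only [List.getElem_map, List.getElem_zip, PySem.List.getElem_pyRange_one, zero_add]
    rw [PySem.List.pyGetD_natCast, PySem.List.pyGetD_natCast,
        List.getD_eq_getElem _ _ hiv, List.getD_eq_getElem _ _ hio]

-- ===== VERDICT (by name: the statement is the Claim_ definition above) =====
theorem create_variants_spec : Claim_equal_create_variants := by
  intro os lp _hdom
  show create_variants os lp = create_variants_alt os lp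
  simp only [create_variants, create_variants_alt]
  have hfun : (fun (acc : List (List String)) s => if PySem.List.len s ≠ 0 then acc ++ [s] else acc)
      = (fun acc s => if (!s.isEmpty) = true then acc ++ [s] else acc) := by
    funext acc s
    by_cases h : s = [] <;> simp [h, PySem.List.len]
  have hseq : (os.foldl (fun acc s => if PySem.List.len s ≠ 0 then acc ++ [s] else acc) [])
      = os.filter (fun s => !s.isEmpty) := by
    rw [hfun]
    simpa using PySem.List.foldl_append_if (fun s : List String => !s.isEmpty) (fun s => s) os []
  rw [hseq]
  set seq := os.filter (fun s => !s.isEmpty) with hS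
  set free := lp - (seq.map (fun s => PySem.List.len s)).sum with hF
  by_cases hfree : free < 0
  · -- free slots negative: both return []
    rw [if_pos hfree]
    have hpool : PySem.List.pyRange 0 (free + 1) 1 = [] :=
      PySem.List.pyRange_one_eq_nil (by omega)
    rw [hpool]
    simp [prodRepA, PySem.List.sorted]
  · rw [if_neg hfree]
    rw [filter_prodRepA (free + 1) seq.length free (by omega) (by omega)]
    simp only [PySem.List.foldl_append_singleton_eq_map]
    simp only [PySem.List.foldl_append_eq_flatMap, List.nil_append]
    have hBeq : List.foldl
        (fun (out : PySem.Set (List String)) comp =>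
          List.foldl
            (fun out order =>
              PySem.Set.add out
                (List.foldl (fun piece gb => piece ++ List.replicate gb.1.toNat "nan" ++ gb.2) [] (comp.zip order) ++
                  List.replicate (PySem.List.pyGetD comp (-1) 0).toNat "nan"))
            out (PySem.List.permutations seq seq.length))
        PySem.Set.empty (compositionsB (seq.length + 1) free)
      = PySem.Set.ofList ((compositionsB (seq.length + 1) free).flatMap (fun comp =>
          (PySem.List.permutations seq seq.length).map (fun order =>
            List.foldl (fun piece gb => piece ++ List.replicate gb.1.toNat "nan" ++ gb.2) [] (comp.zip order) ++
              List.replicate (PySem.List.pyGetD comp (-1) 0).toNat "nan"))) := by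
      rw [PySem.Set.ofList_eq_foldl, List.foldl_flatMap]
      simp only [List.foldl_map]
      rfl
    rw [hBeq]
    congr 1
    congr 1
    apply List.flatMap_congr
    intro v hv
    have hvlen : v.length = seq.length + 1 := compositionsB_length seq.length free v hv
    have hseqmap : (PySem.List.pyRange 0 (PySem.List.len seq) 1).map
        (fun i => PySem.List.pyGetD seq i []) = seq := PySem.List.map_pyGetD_pyRange_zero seq []
    have horder := perms_map seq.length (PySem.List.pyRange 0 (PySem.List.len seq) 1)
      (fun i => PySem.List.pyGetD seq i [])
    rw [hseqmap] at horder
    rw [horder, List.map_map]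
    apply List.map_congr_left
    intro o ho
    have hlenrange : (PySem.List.pyRange 0 (PySem.List.len seq) 1).length = seq.length := by
      simp [PySem.List.length_pyRange_one, PySem.List.len]
    have holen : o.length = seq.length := by
      have hmem : o ∈ PySem.List.permutations (PySem.List.pyRange 0 (PySem.List.len seq) 1)
          (PySem.List.pyRange 0 (PySem.List.len seq) 1).length := by rw [hlenrange]; exact ho
      have hperm := PySem.List.perm_of_mem_permutations hmem
      rw [hperm.length_eq, hlenrange]
    simp only [Function.comp]
    rw [concat_eq seq o v (by omega)]
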